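-- pv_equiv track=rewrite | github.com/monze89/Aufgabensammlung1 | präsenztag pt poth.py | is_proth_opt
-- ===== SOURCE A (Python) =====
-- def is_proth_opt(n):
--
--     if n < 2:
--          return False
--
--     n = n-1
--     i = 0 # count
--
--     while n > 0 and n % 2 == 0:
--           n //= 2
--           i += 1
--     if n < 2**i:
--         return True
--     else:
--          return False
-- ===== SOURCE B (Python) =====
-- def is_proth_opt(n):
--     if n < 2:
--         return False
--     m = n - 1
--     low = m & -m          # lowest set bit of m, i.e. 2**i where 2**i exactly divides m
--     return m < low * low  # odd part of m is < 2**i  iff  m < (2**i)**2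
-- ===== Notes on version B (the rewrite author's own statement) =====
-- stated objective: simpler
-- what changed: Replaced A's while-loop that strips and counts the trailing powers of two (then compares the remaining odd part against that power) by the closed-form bit computation low = m & -m and the single comparison m < low*low.
import Mathlib
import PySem

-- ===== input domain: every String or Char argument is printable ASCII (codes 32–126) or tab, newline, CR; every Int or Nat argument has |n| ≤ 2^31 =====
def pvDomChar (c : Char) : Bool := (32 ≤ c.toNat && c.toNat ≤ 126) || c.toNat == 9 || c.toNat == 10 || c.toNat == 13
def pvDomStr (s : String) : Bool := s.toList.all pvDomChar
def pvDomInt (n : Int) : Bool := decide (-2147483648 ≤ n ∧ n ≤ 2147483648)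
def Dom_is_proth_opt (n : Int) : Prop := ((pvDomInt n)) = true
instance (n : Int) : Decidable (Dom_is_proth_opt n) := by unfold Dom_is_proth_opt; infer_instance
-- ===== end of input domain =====

-- B replaces A's strip-trailing-twos while-loop by the closed-form bit computation
-- low = m & -m and the single comparison m < low*low (objective: simpler, loop-free).

-- ===== PORT A =====
-- the while-loop of A: strips factors of 2 from n, counting them in i
def prothLoop (n : Int) (i : Nat) : Int × Nat :=
  if h : 0 < n ∧ PySem.Int.mod n 2 = 0 then
    prothLoop (PySem.Int.floordiv n 2) (i + 1)
  else
    (n, i)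
termination_by n.toNat
decreasing_by
  rw [PySem.Int.floordiv_eq_ediv_of_pos (by norm_num : (0:Int) < 2)]
  omega

def is_proth_opt (n : Int) : Bool :=
  if n < 2 then false
  else
    let p := prothLoop (n - 1) 0
    if p.1 < 2 ^ p.2 then true else false

-- ===== PORT B =====
-- Python `m & -m` on ints is exactly Int.land m (-m) (two's-complement bitwise and)
def is_proth_opt_alt (n : Int) : Bool :=
  if n < 2 then false
  else
    let m := n - 1
    let low := Int.land m (-m)
    decide (m < low * low)

-- ===== PRECONDITION & SPEC =====
def Spec_is_proth_opt (n : Int) (out : Bool) : Prop := out = is_proth_opt_alt n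
instance (n : Int) (out : Bool) : Decidable (Spec_is_proth_opt n out) := by unfold Spec_is_proth_opt; infer_instance

-- ===== CLAIM (what is proved, stated in full; the proofs are below) =====
def Claim_equal_is_proth_opt : Prop := ∀ (n : Int), Dom_is_proth_opt n → Spec_is_proth_opt n (is_proth_opt n)

-- ===== LEMMAS AND PROOFS =====

theorem nat_ldiff_odd (a : Nat) (ha : a % 2 = 1) : Nat.ldiff a (a - 1) = 1 := by
  apply Nat.eq_of_testBit_eq
  intro i
  rw [Nat.testBit_ldiff]
  cases i with
  | zero =>
      have h0 : (a - 1) % 2 = 0 := by omega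
      simp [Nat.testBit_zero, ha, h0]
  | succ j =>
      rw [Nat.testBit_add_one a, Nat.testBit_add_one (a - 1), Nat.testBit_add_one 1]
      have h1 : (a - 1) / 2 = a / 2 := by omega
      rw [h1]
      simp

theorem nat_ldiff_even (a : Nat) (ha : 1 ≤ a) :
    Nat.ldiff (2 * a) (2 * a - 1) = 2 * Nat.ldiff a (a - 1) := by
  apply Nat.eq_of_testBit_eq
  intro i
  rw [Nat.testBit_ldiff]
  cases i with
  | zero =>
      have h0 : (2 * a) % 2 = 0 := by omega
      have h1 : (2 * Nat.ldiff a (a - 1)) % 2 = 0 := by omega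
      simp [Nat.testBit_zero, h0, h1]
  | succ j =>
      rw [Nat.testBit_add_one (2 * a), Nat.testBit_add_one (2 * a - 1),
          Nat.testBit_add_one (2 * Nat.ldiff a (a - 1))]
      have e1 : 2 * a / 2 = a := by omega
      have e2 : (2 * a - 1) / 2 = a - 1 := by omega
      have e3 : 2 * Nat.ldiff a (a - 1) / 2 = Nat.ldiff a (a - 1) := by omega
      rw [e1, e2, e3, Nat.testBit_ldiff]

theorem int_land_neg_eq_ldiff (a : Nat) (ha : 1 ≤ a) :
    Int.land (a : Int) (-(a : Int)) = (Nat.ldiff a (a - 1) : Int) := by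
  cases a with
  | zero => omega
  | succ b =>
      have hneg : -((b + 1 : Nat) : Int) = Int.negSucc b := rfl
      rw [hneg]
      rfl

theorem land_neg_odd (m : Int) (h1 : 1 ≤ m) (h2 : m % 2 = 1) :
    Int.land m (-m) = 1 := by
  have ha : 1 ≤ m.toNat := by omega
  have hodd : m.toNat % 2 = 1 := by omega
  have h3 : ((m.toNat : Nat) : Int) = m := by omega
  have hl := int_land_neg_eq_ldiff m.toNat ha
  rw [nat_ldiff_odd m.toNat hodd, h3] at hl
  simpa using hl

theorem land_neg_even_nat (a : Nat) (ha : 1 ≤ a) :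
    Int.land ((2 * a : Nat) : Int) (-((2 * a : Nat) : Int)) = 2 * Int.land (a : Int) (-(a : Int)) := by
  rw [int_land_neg_eq_ldiff (2 * a) (by omega), int_land_neg_eq_ldiff a ha, nat_ldiff_even a ha]
  push_cast
  ring

theorem land_neg_even (m : Int) (h1 : 1 ≤ m) :
    Int.land (2 * m) (-(2 * m)) = 2 * Int.land m (-m) := by
  have ha : 1 ≤ m.toNat := by omega
  have h3 : ((m.toNat : Nat) : Int) = m := by omega
  have hl := land_neg_even_nat m.toNat ha
  push_cast at hl
  rw [h3] at hl
  exact hl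

-- the loop starting at counter i returns the same odd part, with i added to the count
theorem prothLoop_shift (N : Nat) : ∀ n : Int, n.toNat ≤ N → ∀ i : Nat,
    prothLoop n i = ((prothLoop n 0).1, (prothLoop n 0).2 + i) := by
  induction N with
  | zero =>
      intro n hn i
      have hcond : ¬ (0 < n ∧ PySem.Int.mod n 2 = 0) := by
        intro h; omega
      rw [prothLoop.eq_1 n i, prothLoop.eq_1 n 0, dif_neg hcond, dif_neg hcond]
      simp
  | succ N ih =>
      intro n hn i
      by_cases hcond : 0 < n ∧ PySem.Int.mod n 2 = 0
      · have hflo : PySem.Int.floordiv n 2 = n / 2 :=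
          PySem.Int.floordiv_eq_ediv_of_pos (by norm_num)
        have hlt : (PySem.Int.floordiv n 2).toNat ≤ N := by
          rw [hflo]; omega
        rw [prothLoop.eq_1 n i, prothLoop.eq_1 n 0, dif_pos hcond, dif_pos hcond,
            ih _ hlt (i + 1), ih _ hlt (0 + 1)]
        simp
        omega
      · rw [prothLoop.eq_1 n i, prothLoop.eq_1 n 0, dif_neg hcond, dif_neg hcond]
        simp

-- structure of A's loop result: it factors n as (odd part) * 2^count,
-- and n & -n is exactly 2^count
theorem prothLoop_key (N : Nat) : ∀ n : Int, n.toNat ≤ N → 1 ≤ n →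
    (prothLoop n 0).1 * 2 ^ (prothLoop n 0).2 = n ∧
    Int.land n (-n) = 2 ^ (prothLoop n 0).2 := by
  induction N with
  | zero => intro n hn h1; omega
  | succ N ih =>
      intro n hn h1
      have hmod : PySem.Int.mod n 2 = n % 2 :=
        PySem.Int.mod_eq_emod_of_pos (by norm_num)
      by_cases heven : n % 2 = 0
      · -- n = 2 * m with m ≥ 1
        have hflo : PySem.Int.floordiv n 2 = n / 2 :=
          PySem.Int.floordiv_eq_ediv_of_pos (by norm_num)
        set m := n / 2 with hm
        have hn2 : n = 2 * m := by omega
        have hm1 : 1 ≤ m := by omega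
        have hmN : m.toNat ≤ N := by omega
        obtain ⟨ih1, ih2⟩ := ih m hmN hm1
        have hcond : (0 < n ∧ PySem.Int.mod n 2 = 0) := ⟨by omega, by omega⟩
        have hstep : prothLoop n 0 = ((prothLoop m 0).1, (prothLoop m 0).2 + 1) := by
          rw [prothLoop.eq_1 n 0, dif_pos hcond, hflo,
              prothLoop_shift m.toNat m le_rfl (0 + 1)]
        rw [hstep]
        constructor
        · calc (prothLoop m 0).1 * 2 ^ ((prothLoop m 0).2 + 1)
              = ((prothLoop m 0).1 * 2 ^ (prothLoop m 0).2) * 2 := by rw [pow_succ]; ring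
            _ = m * 2 := by rw [ih1]
            _ = n := by omega
        · rw [hn2, land_neg_even m hm1, ih2, pow_succ]; ring
      · -- n odd: loop exits immediately
        have hcond : ¬ (0 < n ∧ PySem.Int.mod n 2 = 0) := by
          intro h; omega
        have hstop : prothLoop n 0 = (n, 0) := by
          rw [prothLoop.eq_1 n 0, dif_neg hcond]
        rw [hstop]
        refine ⟨by simp, ?_⟩
        simp only [pow_zero]
        exact land_neg_odd n h1 (by omega)

-- ===== VERDICT (by name: the statement is the Claim_ definition above) =====
theorem is_proth_opt_spec : Claim_equal_is_proth_opt := by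
  intro n _
  unfold Spec_is_proth_opt is_proth_opt is_proth_opt_alt
  by_cases hn : n < 2
  · simp [hn]
  · simp only [hn, if_false]
    have h1 : 1 ≤ n - 1 := by omega
    obtain ⟨hfac, hlow⟩ := prothLoop_key (n - 1).toNat (n - 1) le_rfl h1
    set k := (prothLoop (n - 1) 0).1 with hk
    set v := (prothLoop (n - 1) 0).2 with hv
    have hpow : (0 : Int) < 2 ^ v := by positivity
    have hiff : (k < 2 ^ v) ↔ (n - 1 < Int.land (n - 1) (-(n - 1)) * Int.land (n - 1) (-(n - 1))) := by
      rw [hlow, ← hfac]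
      constructor
      · intro h; nlinarith
      · intro h; nlinarith
    by_cases hcmp : k < 2 ^ v
    · rw [if_pos hcmp, eq_comm, decide_eq_true_eq]
      exact hiff.mp hcmp
    · rw [if_neg hcmp, eq_comm, decide_eq_false_iff_not]
      exact fun h => hcmp (hiff.mpr h)
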